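-- pv_equiv track=rewrite | github.com/talanis85/mudblood-py | mudblood/ansi.py | astringToAnsi
-- ===== SOURCE A (Python) =====
-- def astringToAnsi(astring):
--     ret = ""
--     curattr = None
--
--     for c in astring:
--         if curattr != c[0]:
--             curattr = c[0]
--             ret += "\x1b[{};{}m".format(curattr[0] + 30, curattr[1] + 40)
--         ret += c[1]
--
--     if curattr is not None:
--         ret += "\x1b[0m"
--
--     return ret
-- ===== SOURCE B (Python) =====
-- def astringToAnsi(astring):
--     parts = []
--     i = 0
--     n = len(astring)
--     while i < n:
--         attr = astring[i][0]
--         j = i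
--         while j < n and astring[j][0] == attr:
--             j += 1
--         parts.append("\x1b[{};{}m".format(attr[0] + 30, attr[1] + 40))
--         parts.append("".join(c[1] for c in astring[i:j]))
--         i = j
--     if parts:
--         parts.append("\x1b[0m")
--     return "".join(parts)
-- ===== Notes on version B (the rewrite author's own statement) =====
-- stated objective: alternative
-- what changed: replaces A's char-by-char fold that carries a current-attribute register and grows one string by an explicit maximal-run grouping (two-index scan) that emits one escape per run and joins a list of collected parts
import Mathlib
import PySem

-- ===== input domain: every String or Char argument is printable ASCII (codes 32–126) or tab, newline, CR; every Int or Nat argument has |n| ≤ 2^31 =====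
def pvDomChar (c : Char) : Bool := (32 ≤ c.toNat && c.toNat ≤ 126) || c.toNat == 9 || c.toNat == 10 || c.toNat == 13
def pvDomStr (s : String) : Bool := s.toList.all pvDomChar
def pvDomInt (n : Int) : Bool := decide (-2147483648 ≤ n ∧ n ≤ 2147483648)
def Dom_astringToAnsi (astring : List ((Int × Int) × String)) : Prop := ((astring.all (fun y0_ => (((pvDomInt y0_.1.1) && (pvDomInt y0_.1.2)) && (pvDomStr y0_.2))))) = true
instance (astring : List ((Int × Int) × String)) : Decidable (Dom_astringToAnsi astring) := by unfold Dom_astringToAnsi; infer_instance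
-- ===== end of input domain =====

-- B replaces A's char-by-char fold with a current-attribute register by an explicit
-- maximal-run grouping (two-index scan) that emits one escape per run and joins the parts.

-- ===== PORT A =====
def escA (a : Int × Int) : String :=
  "\x1b[" ++ PySem.Int.toStr (a.1 + 30) ++ ";" ++ PySem.Int.toStr (a.2 + 40) ++ "m"

def stepA (st : String × Option (Int × Int)) (c : (Int × Int) × String) :
    String × Option (Int × Int) :=
  if st.2 ≠ some c.1 then (st.1 ++ escA c.1 ++ c.2, some c.1)
  else (st.1 ++ c.2, st.2)

def astringToAnsi (astring : List ((Int × Int) × String)) : String :=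
  let st := astring.foldl stepA ("", none)
  if st.2.isSome then st.1 ++ "\x1b[0m" else st.1

-- ===== PORT B =====
def escB (a : Int × Int) : String :=
  "\x1b[" ++ PySem.Int.toStr (a.1 + 30) ++ ";" ++ PySem.Int.toStr (a.2 + 40) ++ "m"

-- the inner 'while j < n and astring[j][0] == attr' scan: each step splits off one maximal run
def groupsB : List ((Int × Int) × String) → List ((Int × Int) × List ((Int × Int) × String))
  | [] => []
  | c :: rest =>
    (c.1, c :: rest.takeWhile (fun d => d.1 == c.1)) ::
      groupsB (rest.dropWhile (fun d => d.1 == c.1))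
termination_by xs => xs.length
decreasing_by
  simpa using Nat.lt_succ_of_le (List.length_dropWhile_le _ _)

def astringToAnsi_alt (astring : List ((Int × Int) × String)) : String :=
  let parts := (groupsB astring).map (fun g => escB g.1 ++ String.join (g.2.map (·.2)))
  if parts.isEmpty then "" else String.join parts ++ "\x1b[0m"

-- ===== PRECONDITION & SPEC =====
def Spec_astringToAnsi (astring : List ((Int × Int) × String)) (out : String) : Prop := out = astringToAnsi_alt astring
instance (astring : List ((Int × Int) × String)) (out : String) : Decidable (Spec_astringToAnsi astring out) := by unfold Spec_astringToAnsi; infer_instance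

-- ===== CLAIM (what is proved, stated in full; the proofs are below) =====
def Claim_equal_astringToAnsi : Prop := ∀ (astring : List ((Int × Int) × String)), Dom_astringToAnsi astring → Spec_astringToAnsi astring (astringToAnsi astring)

-- ===== LEMMAS AND PROOFS =====

-- A's running string is a pure accumulator: it can be factored out of the fold
theorem foldlA_factor (xs : List ((Int × Int) × String)) (s : String)
    (cur : Option (Int × Int)) :
    xs.foldl stepA (s, cur) =
      (s ++ (xs.foldl stepA ("", cur)).1, (xs.foldl stepA ("", cur)).2) := by
  induction xs generalizing s cur with
  | nil => simp
  | cons c rest ih =>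
    simp only [List.foldl_cons, stepA]
    by_cases h : cur = some c.1
    · simp only [h, ne_eq, not_true_eq_false, if_false]
      rw [ih (s ++ c.2), ih (("" : String) ++ c.2)]
      simp [String.append_assoc]
    · simp only [ne_eq, h, not_false_eq_true, if_true]
      rw [ih (s ++ escA c.1 ++ c.2), ih (("" : String) ++ escA c.1 ++ c.2)]
      simp [String.append_assoc]

theorem strfold_factor (l : List String) (s : String) :
    l.foldl (fun r t => r ++ t) s = s ++ l.foldl (fun r t => r ++ t) "" := by
  induction l generalizing s with
  | nil => simp
  | cons a l ih =>
    simp only [List.foldl_cons]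
    rw [ih (s ++ a), ih (("" : String) ++ a)]
    simp [String.append_assoc]

theorem strjoin_cons (a : String) (l : List String) :
    String.join (a :: l) = a ++ String.join l := by
  simp only [String.join, List.foldl_cons]
  rw [strfold_factor l (("" : String) ++ a)]
  simp

-- processing a run whose attributes all equal the current attribute just appends the chars
theorem foldlA_run (run : List ((Int × Int) × String)) (a : Int × Int) (s : String)
    (h : ∀ d ∈ run, d.1 = a) :
    run.foldl stepA (s, some a) = (s ++ String.join (run.map (·.2)), some a) := by
  induction run generalizing s with
  | nil => simp [String.join]
  | cons d rest ih =>
    have hd : d.1 = a := h d (List.mem_cons_self)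
    simp only [List.foldl_cons, stepA, hd]
    simp only [ne_eq, not_true_eq_false, if_false]
    rw [ih _ (fun e he => h e (List.mem_cons_of_mem _ he))]
    simp [strjoin_cons, String.append_assoc]

def lastAttr (xs : List ((Int × Int) × String)) (cur : Option (Int × Int)) :
    Option (Int × Int) :=
  match xs.getLast? with
  | some c => some c.1
  | none => cur

theorem foldlA_groups (fuel : Nat) (xs : List ((Int × Int) × String))
    (cur : Option (Int × Int)) (hfuel : xs.length ≤ fuel)
    (hcur : ∀ c rest, xs = c :: rest → cur ≠ some c.1) :
    xs.foldl stepA ("", cur) =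
      (String.join ((groupsB xs).map (fun g => escB g.1 ++ String.join (g.2.map (·.2)))),
       lastAttr xs cur) := by
  induction fuel generalizing xs cur with
  | zero =>
    have : xs = [] := List.length_eq_zero_iff.mp (Nat.le_zero.mp hfuel)
    subst this; simp [groupsB, lastAttr, String.join]
  | succ n ih =>
    match xs with
    | [] => simp [groupsB, lastAttr, String.join]
    | c :: rest =>
      have hne : cur ≠ some c.1 := hcur c rest rfl
      set run := rest.takeWhile (fun d => d.1 == c.1) with hrun
      set rest' := rest.dropWhile (fun d => d.1 == c.1) with hrest'
      have hsplit : rest = run ++ rest' := (List.takeWhile_append_dropWhile).symm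
      have hrunattr : ∀ d ∈ run, d.1 = c.1 := by
        intro d hd
        have := List.mem_takeWhile_imp hd
        simpa using this
      have hlenr' : rest'.length ≤ n := by
        have h1 : rest'.length ≤ rest.length := List.length_dropWhile_le _ _
        have h2 : rest.length ≤ n := by simpa using hfuel
        omega
      have hhead : ∀ e l, rest' = e :: l → (some c.1 : Option (Int × Int)) ≠ some e.1 := by
        intro e l hel heq
        have : (fun d => d.1 == c.1) e = false := by
          have := List.head?_dropWhile_not (fun d => d.1 == c.1) rest
          rw [← hrest', hel] at this
          simpa using this
        simp at this
        exact this (by simpa using heq.symm)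
      -- unfold one step of the fold
      have hstep : stepA ("", cur) c = (escA c.1 ++ c.2, some c.1) := by
        simp [stepA, hne]
      calc (c :: rest).foldl stepA ("", cur)
          = rest.foldl stepA (escA c.1 ++ c.2, some c.1) := by
            simp [List.foldl_cons, hstep]
        _ = (run ++ rest').foldl stepA (escA c.1 ++ c.2, some c.1) := by rw [← hsplit]
        _ = rest'.foldl stepA (escA c.1 ++ c.2 ++ String.join (run.map (·.2)), some c.1) := by
            rw [List.foldl_append, foldlA_run run c.1 _ hrunattr]
        _ = (escA c.1 ++ c.2 ++ String.join (run.map (·.2)) ++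
              (rest'.foldl stepA ("", some c.1)).1, (rest'.foldl stepA ("", some c.1)).2) := by
            rw [foldlA_factor]
        _ = _ := by
            rw [ih rest' (some c.1) hlenr' hhead]
            have hgroups : groupsB (c :: rest) =
                (c.1, c :: run) :: groupsB rest' := by
              rw [groupsB]
            rw [hgroups]
            simp only [List.map_cons, strjoin_cons, Prod.mk.injEq]
            refine ⟨?_, ?_⟩
            · simp [escA, escB, String.append_assoc]
            · -- last attribute
              show lastAttr rest' (some c.1) = lastAttr (c :: rest) cur
              unfold lastAttr
              match hrl : rest'.getLast? with
              | some e =>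
                have : (c :: rest).getLast? = some e := by
                  have hr'ne : rest' ≠ [] := by
                    intro h; rw [h] at hrl; simp at hrl
                  rw [hsplit]
                  have : (c :: (run ++ rest')) = (c :: run) ++ rest' := by simp
                  rw [this, List.getLast?_append_of_ne_nil _ hr'ne]
                  exact hrl
                simp [this]
              | none =>
                have hr'e : rest' = [] := List.getLast?_eq_none_iff.mp hrl
                rw [hr'e] at hsplit
                simp only [List.append_nil] at hsplit
                -- last of c :: rest has attribute c.1
                have hmem := List.getLast_mem (l := c :: rest) (by simp)
                have hlast : ((c :: rest).getLast (by simp)).1 = c.1 := by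
                  rcases List.mem_cons.mp hmem with h | h
                  · rw [h]
                  · exact hrunattr _ (hsplit ▸ h)
                have : (c :: rest).getLast? = some ((c :: rest).getLast (by simp)) :=
                  List.getLast?_eq_some_getLast _
                simp [this, hlast]

theorem groupsB_nil_iff (xs : List ((Int × Int) × String)) :
    groupsB xs = [] ↔ xs = [] := by
  match xs with
  | [] => simp [groupsB]
  | c :: rest => rw [groupsB]; simp

-- ===== VERDICT (by name: the statement is the Claim_ definition above) =====
theorem astringToAnsi_spec : Claim_equal_astringToAnsi := by
  intro xs _
  show astringToAnsi xs = astringToAnsi_alt xs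
  unfold astringToAnsi astringToAnsi_alt
  rw [foldlA_groups xs.length xs none le_rfl (by intro c rest h hx; cases hx)]
  match hx : xs with
  | [] => simp [groupsB, lastAttr, String.join]
  | c :: rest =>
    have h1 : lastAttr (c :: rest) none = some ((c :: rest).getLast (by simp)).1 := by
      unfold lastAttr
      rw [List.getLast?_eq_some_getLast (by simp)]
    have h2 : groupsB (c :: rest) ≠ [] := by
      simp [groupsB_nil_iff]
    simp only [h1, Option.isSome_some, if_true]
    simp [List.isEmpty_iff, h2]
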